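-- pv_equiv track=rewrite | github.com/creativerbl/noibu-traffic-gen-full | trafficgen/session.py | _find_nav_target
-- ===== SOURCE A (Python) =====
-- from typing import Any, Dict, List, Optional, Tuple
--
-- def _find_nav_target(links: List[Tuple[str, Any]], target_label: str) -> Optional[Tuple[str, Any]]:
--     for label, el in links:
--         if label == target_label:
--             return (label, el)
--     for label, el in links:
--         if target_label in label or label in target_label:
--             return (label, el)
--     return None
-- ===== SOURCE B (Python) =====
-- from typing import Any, List, Optional, Tuple
--
-- def _find_nav_target(links: List[Tuple[str, Any]], target_label: str) -> Optional[Tuple[str, Any]]: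
--     exact = None
--     sub = None
--     for label, el in reversed(links):
--         if label == target_label:
--             exact = (label, el)
--         elif target_label in label or label in target_label:
--             sub = (label, el)
--     return exact if exact is not None else sub
-- ===== Notes on version B (the rewrite author's own statement) =====
-- stated objective: alternative
-- what changed: Replaced A's two early-returning forward scans by one backward (reversed) loop that overwrites two accumulators (last-seen-while-reversed = first exact match and first substring match) and selects between them after the loop.
import Mathlib
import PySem

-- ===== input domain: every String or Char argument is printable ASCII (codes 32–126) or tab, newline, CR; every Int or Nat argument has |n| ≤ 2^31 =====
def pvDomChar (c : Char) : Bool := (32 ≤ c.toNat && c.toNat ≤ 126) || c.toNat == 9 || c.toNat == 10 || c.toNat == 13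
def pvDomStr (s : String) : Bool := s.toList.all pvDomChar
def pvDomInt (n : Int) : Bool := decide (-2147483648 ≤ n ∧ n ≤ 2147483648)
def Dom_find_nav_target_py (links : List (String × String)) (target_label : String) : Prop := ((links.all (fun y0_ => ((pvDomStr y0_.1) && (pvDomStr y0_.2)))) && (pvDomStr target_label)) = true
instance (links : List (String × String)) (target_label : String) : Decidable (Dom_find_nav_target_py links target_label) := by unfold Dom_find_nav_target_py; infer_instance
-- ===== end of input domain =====

-- B replaces A's two early-returning forward scans by one backward (reversed) loop overwriting two accumulators, selecting exact over substring after the loop; same O(n).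


-- ===== PORT A =====
-- first loop of A: exact label match, early return
def fntExactScan (links : List (String × String)) (target_label : String) : Option (String × String) :=
  match links with
  | [] => none
  | (label, el) :: rest =>
      if label == target_label then some (label, el)
      else fntExactScan rest target_label

-- second loop of A: substring match (either direction), early return
def fntSubScan (links : List (String × String)) (target_label : String) : Option (String × String) :=
  match links with
  | [] => none
  | (label, el) :: rest =>
      if PySem.Str.isIn target_label label || PySem.Str.isIn label target_label then some (label, el)
      else fntSubScan rest target_label

def find_nav_target_py (links : List (String × String)) (target_label : String) : Option (String × String) :=
  match fntExactScan links target_label with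
  | some r => some r
  | none => fntSubScan links target_label

-- ===== PORT B =====
-- B's loop over reversed(links): later elements are processed first, so the
-- recursion handles the tail before the head overwrites the two accumulators.
def fntRevLoop (links : List (String × String)) (target_label : String) :
    Option (String × String) × Option (String × String) :=
  match links with
  | [] => (none, none)
  | (label, el) :: rest =>
      let acc := fntRevLoop rest target_label
      if label == target_label then (some (label, el), acc.2)
      else if PySem.Str.isIn target_label label || PySem.Str.isIn label target_label then
        (acc.1, some (label, el))
      else acc

def find_nav_target_py_alt (links : List (String × String)) (target_label : String) : Option (String × String) :=
  match fntRevLoop links target_label with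
  | (some r, _) => some r
  | (none, s) => s

-- ===== PRECONDITION & SPEC =====
def Spec_find_nav_target_py (links : List (String × String)) (target_label : String) (out : Option (String × String)) : Prop := out = find_nav_target_py_alt links target_label
instance (links : List (String × String)) (target_label : String) (out : Option (String × String)) : Decidable (Spec_find_nav_target_py links target_label out) := by unfold Spec_find_nav_target_py; infer_instance

-- ===== CLAIM =====
def Claim_equal_find_nav_target_py : Prop := ∀ (links : List (String × String)) (target_label : String), Dom_find_nav_target_py links target_label → Spec_find_nav_target_py links target_label (find_nav_target_py links target_label)

-- ===== LEMMAS AND PROOFS =====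
-- invariant: the first accumulator is A's exact scan, and when it is empty the
-- second accumulator is A's substring scan
theorem fntRevLoop_eq (links : List (String × String)) (target_label : String) :
    (fntRevLoop links target_label).1 = fntExactScan links target_label ∧
    ((fntRevLoop links target_label).1 = none →
      (fntRevLoop links target_label).2 = fntSubScan links target_label) := by
  induction links with
  | nil => simp [fntRevLoop, fntExactScan, fntSubScan]
  | cons hd rest ih =>
    obtain ⟨label, el⟩ := hd
    obtain ⟨ih1, ih2⟩ := ih
    by_cases hx : label == target_label
    · simp [fntRevLoop, fntExactScan, hx]
    · by_cases h1 : PySem.Chars.isIn target_label.toList label.toList = true <;>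
        by_cases h2 : PySem.Chars.isIn label.toList target_label.toList = true <;>
        simp [fntRevLoop, fntExactScan, fntSubScan, PySem.Str.isIn, hx, h1, h2, ih1]
      exact fun h => ih2 (ih1.trans h)

-- ===== VERDICT =====
theorem find_nav_target_py_spec : Claim_equal_find_nav_target_py := by
  intro links target_label _
  unfold Spec_find_nav_target_py find_nav_target_py find_nav_target_py_alt
  obtain ⟨h1, h2⟩ := fntRevLoop_eq links target_label
  cases hacc : fntRevLoop links target_label with
  | mk e s =>
    cases e with
    | some r => simp [hacc] at h1; simp [← h1]
    | none =>
      simp [hacc] at h1 h2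
      simp [← h1, h2]
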